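-- pv_equiv track=rewrite | github.com/hhongjoon/TIL | HJ_AL/TST/초콜릿 공장.py | check
-- ===== SOURCE A (Python) =====
-- def check(a,b):
--     check={}
--     for i in a:
--         if check.get(i) is None:
--             check[i] = -1
--         else:
--             return 0 # 중복이니까 실패
--
--     for j in b:
--         if check.get(j) is None:
--             check[j] = 0  # 두번째 회사 들어오는 것
--         else:
--             check[j] += 1
--             if check[j] >= 1:
--                 return 0
--     if len(a)+len(b) - len(check) >= 2:  # 갯수가 없다면 중복이 많다는 것
--         return 0
--     return 1
-- ===== SOURCE B (Python) =====
-- def check(a, b):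
--     sa = sorted(a)
--     sb = sorted(b)
--     for x, y in zip(sa, sa[1:]):
--         if x == y:
--             return 0
--     for x, y in zip(sb, sb[1:]):
--         if x == y:
--             return 0
--     i = j = shared = 0
--     while i < len(sa) and j < len(sb):
--         if sa[i] == sb[j]:
--             shared += 1
--             if shared >= 2:
--                 return 0
--             i += 1
--             j += 1
--         elif sa[i] < sb[j]:
--             i += 1
--         else:
--             j += 1
--     return 1
-- ===== Notes on version B (the rewrite author's own statement) =====
-- stated objective: alternative
-- what changed: Replaced the -1/0-sentinel dict state machine with sort-then-scan: sort both lists, detect in-list duplicates by comparing adjacent elements, and count shared elements with a two-pointer merge that exits once two overlaps are found.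
import Mathlib
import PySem

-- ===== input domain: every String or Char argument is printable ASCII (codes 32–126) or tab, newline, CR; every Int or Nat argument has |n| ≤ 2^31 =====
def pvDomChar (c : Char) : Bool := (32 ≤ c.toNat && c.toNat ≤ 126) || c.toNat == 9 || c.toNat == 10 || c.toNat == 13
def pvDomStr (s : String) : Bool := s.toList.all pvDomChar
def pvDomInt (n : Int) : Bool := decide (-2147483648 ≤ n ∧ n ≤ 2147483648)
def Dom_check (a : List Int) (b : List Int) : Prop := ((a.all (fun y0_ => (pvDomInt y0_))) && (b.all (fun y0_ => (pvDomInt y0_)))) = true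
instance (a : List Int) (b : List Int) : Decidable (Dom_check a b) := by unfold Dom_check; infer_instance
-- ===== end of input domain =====

-- B replaces A's -1/0-sentinel dict state machine by sort-then-scan: adjacent-duplicate
-- checks on the sorted lists and a two-pointer merge counting shared elements (alternative
-- algorithm of similar cost; same result).

-- ===== PORT A =====
-- first loop: for i in a: if check.get(i) is None: check[i] = -1 else: return 0
def checkLoopA (d : PySem.Dict Int Int) : List Int → Option (PySem.Dict Int Int)
  | [] => some d
  | i :: rest =>
    match d.get? i with
    | none => checkLoopA (d.insert i (-1)) rest
    | some _ => none

-- second loop: for j in b: if check.get(j) is None: check[j] = 0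
--              else: check[j] += 1; if check[j] >= 1: return 0
def checkLoopB (d : PySem.Dict Int Int) : List Int → Option (PySem.Dict Int Int)
  | [] => some d
  | j :: rest =>
    match d.get? j with
    | none => checkLoopB (d.insert j 0) rest
    | some v =>
      if v + 1 ≥ 1 then none
      else checkLoopB (d.insert j (v + 1)) rest

def check (a : List Int) (b : List Int) : Int :=
  match checkLoopA PySem.Dict.empty a with
  | none => 0
  | some d =>
    match checkLoopB d b with
    | none => 0
    | some d2 =>
      if (a.length : Int) + (b.length : Int) - (d2.size : Int) ≥ 2 then 0 else 1

-- ===== PORT B =====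
-- for x, y in zip(s, s[1:]): if x == y: return 0
def hasAdjDup : List Int → Bool
  | x :: y :: rest => x == y || hasAdjDup (y :: rest)
  | _ => false

-- the while loop with pointers i, j and the 'shared' counter; true = reached 'return 0'
def mergeHit2 : List Int → List Int → Int → Bool
  | x :: xs, y :: ys, s =>
    if x = y then
      if s + 1 ≥ 2 then true else mergeHit2 xs ys (s + 1)
    else if x < y then mergeHit2 xs (y :: ys) s
    else mergeHit2 (x :: xs) ys s
  | _, _, _ => false

def check_alt (a : List Int) (b : List Int) : Int :=
  let sa := PySem.List.sorted a (fun x => x) false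
  let sb := PySem.List.sorted b (fun x => x) false
  if hasAdjDup sa then 0
  else if hasAdjDup sb then 0
  else if mergeHit2 sa sb 0 then 0
  else 1

-- ===== PRECONDITION & SPEC =====
def Spec_check (a : List Int) (b : List Int) (out : Int) : Prop := out = check_alt a b
instance (a : List Int) (b : List Int) (out : Int) : Decidable (Spec_check a b out) := by unfold Spec_check; infer_instance

-- ===== CLAIM (what is proved, stated in full; the proofs are below) =====
def Claim_equal_check : Prop := ∀ (a : List Int) (b : List Int), Dom_check a b → Spec_check a b (check a b)

-- ===== LEMMAS AND PROOFS =====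

-- the common value both programs compute: 0 unless a and b are duplicate-free and share < 2 elements
def checkCanon (a : List Int) (b : List Int) : Int :=
  if a.Nodup ∧ b.Nodup ∧ (b.filter (fun y => decide (y ∈ a))).length < 2 then 1 else 0

-- ---------- A-side ----------

-- the first loop succeeds exactly when a has no duplicate and touches only fresh keys
lemma loopA_spec (a : List Int) : ∀ d : PySem.Dict Int Int,
    checkLoopA d a =
      if a.Nodup ∧ ∀ x ∈ a, d.get? x = none
      then some (a.foldl (fun d i => d.insert i (-1)) d) else none := by
  induction a with
  | nil => intro d; simp [checkLoopA]
  | cons i rest ih =>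
    intro d
    simp only [checkLoopA]
    cases h : d.get? i with
    | some v =>
      rw [if_neg]
      rintro ⟨-, hall⟩
      exact (by simp [h] : d.get? i ≠ none) (hall i (by simp))
    | none =>
      rw [ih]
      by_cases hcond : (i :: rest).Nodup ∧ ∀ x ∈ i :: rest, d.get? x = none
      · rw [if_pos, if_pos hcond]
        · simp [List.foldl_cons]
        · obtain ⟨hnd, hall⟩ := hcond
          refine ⟨(List.nodup_cons.mp hnd).2, fun x hx => ?_⟩
          rw [PySem.Dict.get?_insert_of_ne d (-1) (fun he : x = i => (List.nodup_cons.mp hnd).1 (he ▸ hx))]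
          exact hall x (List.mem_cons_of_mem _ hx)
      · rw [if_neg, if_neg hcond]
        rintro ⟨hnd, hall⟩
        apply hcond
        constructor
        · rw [List.nodup_cons]
          refine ⟨fun hmem => ?_, hnd⟩
          have := hall i hmem
          simp [PySem.Dict.get?_insert_self] at this
        · intro x hx
          rcases List.mem_cons.mp hx with rfl | hx'
          · exact h
          · have := hall x hx'
            by_cases hxi : x = i
            · exact hxi ▸ h
            · rwa [PySem.Dict.get?_insert_of_ne d (-1) hxi] at this

-- an element of b already mapped to 0 forces the second loop to exit with 0
lemma loopB_hit : ∀ (b : List Int) (d : PySem.Dict Int Int),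
    (∃ x ∈ b, d.get? x = some 0) → checkLoopB d b = none := by
  intro b
  induction b with
  | nil => rintro d ⟨x, hx, -⟩; exact absurd hx (List.not_mem_nil)
  | cons j rest ih =>
    rintro d ⟨x, hx, hx0⟩
    simp only [checkLoopB]
    cases h : d.get? j with
    | none =>
      have hxj : x ≠ j := fun he => by rw [he, h] at hx0; simp at hx0
      apply ih
      exact ⟨x, (List.mem_cons.mp hx).resolve_left hxj,
        by rw [PySem.Dict.get?_insert_of_ne d 0 hxj]; exact hx0⟩
    | some v =>
      dsimp only
      by_cases hv : v + 1 ≥ 1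
      · simp [hv]
      · rw [if_neg hv]
        have hxj : x ≠ j := fun he => by
          rw [he, h] at hx0; cases hx0; omega
        apply ih
        exact ⟨x, (List.mem_cons.mp hx).resolve_left hxj,
          by rw [PySem.Dict.get?_insert_of_ne d (v+1) hxj]; exact hx0⟩

-- on a dict whose b-relevant values are all -1 (fresh or coming from the a-loop),
-- the second loop succeeds exactly when b has no duplicate, and then sets every j ∈ b to 0
lemma loopB_spec : ∀ (b : List Int) (d : PySem.Dict Int Int),
    (∀ x ∈ b, d.get? x = none ∨ d.get? x = some (-1)) →
    checkLoopB d b =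
      if b.Nodup then some (b.foldl (fun d j => d.insert j 0) d) else none := by
  intro b
  induction b with
  | nil => intro d _; simp [checkLoopB]
  | cons j rest ih =>
    intro d hvals
    simp only [checkLoopB]
    have hstep : ∀ d' : PySem.Dict Int Int, d' = d.insert j 0 →
        checkLoopB d' rest =
          if (j :: rest).Nodup then some ((j :: rest).foldl (fun d j => d.insert j 0) d) else none := by
      rintro d' rfl
      by_cases hj : j ∈ rest
      · rw [loopB_hit rest _ ⟨j, hj, PySem.Dict.get?_insert_self d j 0⟩, if_neg]
        simp [List.nodup_cons, hj]
      · rw [ih]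
        · simp [List.nodup_cons, hj, List.foldl_cons]
        · intro x hx
          have hxj : x ≠ j := fun he => hj (he ▸ hx)
          rw [PySem.Dict.get?_insert_of_ne d 0 hxj]
          exact hvals x (List.mem_cons_of_mem _ hx)
    cases h : d.get? j with
    | none => exact hstep _ rfl
    | some v =>
      dsimp only
      have hv : v = -1 := by
        rcases hvals j (by simp) with h' | h' <;> rw [h] at h' <;> cases h'; rfl
      subst hv
      rw [if_neg (by norm_num : ¬((-1:Int) + 1 ≥ 1)), show (-1:Int) + 1 = 0 by norm_num]
      exact hstep _ rfl

-- the dict built by the a-loop maps exactly the members of a to -1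
lemma dictA_get (a : List Int) : ∀ (d : PySem.Dict Int Int) (x : Int),
    (a.foldl (fun d i => d.insert i (-1)) d).get? x =
      if x ∈ a then some (-1) else d.get? x := by
  induction a with
  | nil => intro d x; simp
  | cons i rest ih =>
    intro d x
    simp only [List.foldl_cons, ih]
    by_cases hx : x ∈ rest
    · simp [hx]
    · by_cases hxi : x = i
      · subst hxi; simp [hx, PySem.Dict.get?_insert_self]
      · simp [hx, hxi, PySem.Dict.get?_insert_of_ne d (-1) hxi]

lemma contains_eq_decide_mem (a : List Int) (y : Int) :
    PySem.Set.contains a y = decide (y ∈ a) := by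
  by_cases h : y ∈ a
  · simp [h]
  · simp only [h, decide_false]
    exact Bool.not_eq_true _ ▸ (fun ht => h ((PySem.Set.contains_iff a y).mp ht))

lemma check_eq_canon (a b : List Int) : check a b = checkCanon a b := by
  by_cases ha : a.Nodup
  · rw [check, loopA_spec a PySem.Dict.empty, if_pos ⟨ha, fun x _ => PySem.Dict.get?_empty x⟩]
    dsimp only
    set d0 := a.foldl (fun d i => d.insert i (-1)) PySem.Dict.empty with hd0
    rw [loopB_spec b d0 (fun x _ => by
      rw [hd0, dictA_get a PySem.Dict.empty x]
      by_cases hx : x ∈ a <;> simp [hx])]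
    by_cases hb : b.Nodup
    · rw [if_pos hb]
      dsimp only
      have hkeys0 : d0.keys = a := by
        rw [hd0]
        have := PySem.Dict.keys_foldl_insert a (fun _ _ => (-1 : Int)) PySem.Dict.empty
        simpa [PySem.Set.update_nil_left, PySem.Set.ofList_eq_self_of_nodup a ha] using this
      have hsize : (b.foldl (fun d j => d.insert j 0) d0).size = (PySem.Set.update a b).length := by
        have h2 := PySem.Dict.keys_foldl_insert b (fun _ _ => (0 : Int)) d0
        rw [hkeys0] at h2
        have h1 : (b.foldl (fun d j => d.insert j 0) d0).keys.length = (PySem.Set.update a b).length := by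
          rw [h2]
        simpa [PySem.Dict.keys, PySem.Dict.size] using h1
      have hupd : (PySem.Set.update a b).length
          = a.length + (b.filter (fun y => !(PySem.Set.contains a y))).length := by
        rw [PySem.Set.update_eq_append_filter a b, PySem.Set.ofList_eq_self_of_nodup b hb,
          List.length_append]
      have hsplit : (b.filter (fun y => PySem.Set.contains a y)).length
          + (b.filter (fun y => !(PySem.Set.contains a y))).length = b.length :=
        (List.length_eq_length_filter_add (fun y => PySem.Set.contains a y)).symm
      have hmemfilter : (b.filter (fun y => PySem.Set.contains a y)).length
          = (b.filter (fun y => decide (y ∈ a))).length := by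
        congr 1
        exact List.filter_congr (fun y _ => contains_eq_decide_mem a y)
      have hcond : ((a.length : Int) + (b.length : Int) - (((b.foldl (fun d j => d.insert j 0) d0).size : Int)) ≥ 2)
          ↔ ¬ ((b.filter (fun y => decide (y ∈ a))).length < 2) := by
        rw [hsize, hupd]
        rw [← hmemfilter]
        push_cast
        omega
      rw [checkCanon]
      by_cases hc : (b.filter (fun y => decide (y ∈ a))).length < 2
      · rw [if_neg (fun h => (hcond.mp h) hc), if_pos ⟨ha, hb, hc⟩]
      · rw [if_pos (hcond.mpr hc), if_neg (fun h => hc h.2.2)]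
    · rw [if_neg hb]
      dsimp only
      rw [checkCanon, if_neg (fun h => hb h.2.1)]
  · rw [check, loopA_spec a PySem.Dict.empty, if_neg (fun h => ha h.1)]
    dsimp only
    rw [checkCanon, if_neg (fun h => ha h.1)]

-- ---------- B-side ----------

-- number of shared elements the two-pointer merge visits (no early exit)
def commonCount : List Int → List Int → Nat
  | x :: xs, y :: ys =>
    if x = y then 1 + commonCount xs ys
    else if x < y then commonCount xs (y :: ys)
    else commonCount (x :: xs) ys
  | _, _ => 0

-- the early-exit merge loop fires exactly when the total shared count reaches 2
lemma mergeHit2_eq : ∀ (sa sb : List Int) (s : Int), s ≤ 1 →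
    mergeHit2 sa sb s = decide (2 ≤ s + (commonCount sa sb : Int)) := by
  intro sa sb s
  induction sa, sb, s using mergeHit2.induct with
  | case1 xs y ys s hs2 =>
    intro _
    simp only [mergeHit2, commonCount, if_true, if_pos hs2]
    rw [eq_comm, decide_eq_true_iff]
    push_cast
    omega
  | case2 xs y ys s hs2 ih =>
    intro _
    rw [show mergeHit2 (y :: xs) (y :: ys) s = mergeHit2 xs ys (s + 1) by
      simp [mergeHit2, hs2]]
    rw [ih (by omega)]
    simp only [commonCount, if_true]
    congr 1
    rw [eq_iff_iff]
    push_cast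
    omega
  | case3 x xs y ys s hxy hlt ih =>
    intro hs
    rw [show mergeHit2 (x :: xs) (y :: ys) s = mergeHit2 xs (y :: ys) s by
      simp [mergeHit2, hxy, hlt]]
    rw [ih hs]
    simp [commonCount, hxy, hlt]
  | case4 x xs y ys s hxy hlt ih =>
    intro hs
    rw [show mergeHit2 (x :: xs) (y :: ys) s = mergeHit2 (x :: xs) ys s by
      simp [mergeHit2, hxy, hlt]]
    rw [ih hs]
    simp [commonCount, hxy, hlt]
  | case5 l1 l2 s h =>
    intro hs
    match l1, l2 with
    | [], l2 =>
      have : ¬ (2 ≤ s + ((commonCount [] l2 : Nat) : Int)) := by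
        simp [commonCount]; omega
      simp [mergeHit2, this]
    | x :: xs, [] =>
      have : ¬ (2 ≤ s + ((commonCount (x :: xs) [] : Nat) : Int)) := by
        simp [commonCount]; omega
      simp [mergeHit2, this]
    | x :: xs, y :: ys => exact (h x xs y ys rfl rfl).elim

-- on strictly increasing lists the merge counts exactly the shared elements
lemma commonCount_eq_filter : ∀ (sa sb : List Int),
    sa.Pairwise (· < ·) → sb.Pairwise (· < ·) →
    commonCount sa sb = (sb.filter (fun y => decide (y ∈ sa))).length := by
  intro sa sb
  induction sa, sb using commonCount.induct with
  | case1 xs y ys ih =>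
    intro ha hb
    have hb' := (List.pairwise_cons.mp hb).2
    have hbl := (List.pairwise_cons.mp hb).1
    simp only [commonCount, if_true]
    rw [List.filter_cons_of_pos (by simp)]
    rw [ih (List.pairwise_cons.mp ha).2 hb']
    have heq : ys.filter (fun z => decide (z ∈ y :: xs)) = ys.filter (fun z => decide (z ∈ xs)) := by
      apply List.filter_congr
      intro z hz
      have hyz : y < z := hbl z hz
      have hzy : z ≠ y := by omega
      simp [List.mem_cons, hzy]
    rw [heq, List.length_cons]
    omega
  | case2 x xs y ys hxy hlt ih =>
    intro ha hb
    simp only [commonCount, if_neg hxy, if_pos hlt]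
    rw [ih (List.pairwise_cons.mp ha).2 hb]
    congr 1
    apply List.filter_congr
    intro z hz
    have hyz : y ≤ z := by
      rcases List.mem_cons.mp hz with rfl | hz'
      · exact le_refl z
      · exact le_of_lt ((List.pairwise_cons.mp hb).1 z hz')
    have hxz : x < z := lt_of_lt_of_le hlt hyz
    have hzx : z ≠ x := by omega
    simp [List.mem_cons, hzx]
  | case3 x xs y ys hxy hlt ih =>
    intro ha hb
    have hyx : y < x := by omega
    simp only [commonCount, if_neg hxy, if_neg hlt]
    rw [ih ha (List.pairwise_cons.mp hb).2]
    have hynot : y ∉ x :: xs := by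
      intro hy
      rcases List.mem_cons.mp hy with rfl | hy'
      · exact absurd hyx (lt_irrefl y)
      · exact absurd (lt_trans hyx ((List.pairwise_cons.mp ha).1 y hy')) (lt_irrefl y)
    rw [List.filter_cons_of_neg (by simpa using hynot)]
  | case4 l1 l2 h =>
    intro ha hb
    match l1, l2 with
    | [], l2 =>
      simp only [commonCount]
      rw [eq_comm]
      simp
    | x :: xs, [] => simp [commonCount]
    | x :: xs, y :: ys => exact (h x xs y ys rfl rfl).elim

-- adjacent-duplicate scan on an ordered list detects exactly non-Nodup
lemma hasAdjDup_eq_false_iff : ∀ (l : List Int), l.Pairwise (· ≤ ·) →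
    (hasAdjDup l = false ↔ l.Nodup) := by
  intro l
  induction l with
  | nil => intro _; simp [hasAdjDup]
  | cons x t ih =>
    intro hp
    cases t with
    | nil => simp [hasAdjDup]
    | cons y t2 =>
      have hp' := (List.pairwise_cons.mp hp).2
      have hxall := (List.pairwise_cons.mp hp).1
      simp only [hasAdjDup, Bool.or_eq_false_iff, beq_eq_false_iff_ne, ne_eq]
      rw [ih hp']
      constructor
      · rintro ⟨hxy, hnd⟩
        rw [List.nodup_cons]
        refine ⟨?_, hnd⟩
        intro hx
        rcases List.mem_cons.mp hx with rfl | hx'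
        · exact hxy rfl
        · have hxy' : x < y := lt_of_le_of_ne (hxall y (by simp)) hxy
          have hyx : y ≤ x := by
            rcases List.pairwise_cons.mp hp' with ⟨hyall, -⟩
            exact hyall x hx'
          omega
      · intro hnd
        rcases List.nodup_cons.mp hnd with ⟨hxn, hnd'⟩
        exact ⟨fun he => hxn (he ▸ List.mem_cons_self), hnd'⟩

lemma check_alt_eq_canon (a b : List Int) : check_alt a b = checkCanon a b := by
  simp only [check_alt]
  set sa := PySem.List.sorted a (fun x => x) false with hsa
  set sb := PySem.List.sorted b (fun x => x) false with hsb
  have hpa : sa.Pairwise (· ≤ ·) := PySem.List.sorted_pairwise a (fun x => x)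
  have hpb : sb.Pairwise (· ≤ ·) := PySem.List.sorted_pairwise b (fun x => x)
  have hperma : sa.Perm a := PySem.List.sorted_perm a (fun x => x) false
  have hpermb : sb.Perm b := PySem.List.sorted_perm b (fun x => x) false
  have hnda : sa.Nodup ↔ a.Nodup := hperma.nodup_iff
  have hndb : sb.Nodup ↔ b.Nodup := hpermb.nodup_iff
  by_cases ha : a.Nodup
  · rw [if_neg (by rw [Bool.not_eq_true, hasAdjDup_eq_false_iff sa hpa, hnda]; exact ha)]
    by_cases hb : b.Nodup
    · rw [if_neg (by rw [Bool.not_eq_true, hasAdjDup_eq_false_iff sb hpb, hndb]; exact hb)]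
      have hlta : sa.Pairwise (· < ·) :=
        ((hpa.and (hnda.mpr ha)).imp (fun h => lt_of_le_of_ne h.1 h.2))
      have hltb : sb.Pairwise (· < ·) :=
        ((hpb.and (hndb.mpr hb)).imp (fun h => lt_of_le_of_ne h.1 h.2))
      rw [mergeHit2_eq sa sb 0 (by omega), commonCount_eq_filter sa sb hlta hltb]
      have hfeq : (sb.filter (fun y => decide (y ∈ sa))).length
          = (b.filter (fun y => decide (y ∈ a))).length := by
        rw [show sb.filter (fun y => decide (y ∈ sa)) = sb.filter (fun y => decide (y ∈ a)) from
          List.filter_congr (fun z _ => by simp [hperma.mem_iff])]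
        exact (hpermb.filter _).length_eq
      rw [hfeq, checkCanon]
      by_cases hc : (b.filter (fun y => decide (y ∈ a))).length < 2
      · rw [if_neg (by simp; omega), if_pos ⟨ha, hb, hc⟩]
      · rw [if_pos (by simp; omega), if_neg (fun h => hc h.2.2)]
    · rw [if_pos (by
        rcases Bool.eq_false_or_eq_true (hasAdjDup sb) with h | h
        · exact h
        · exact absurd ((hasAdjDup_eq_false_iff sb hpb).mp h) (fun h' => hb (hndb.mp h')))]
      rw [checkCanon, if_neg (fun h => hb h.2.1)]
  · rw [if_pos (by
      rcases Bool.eq_false_or_eq_true (hasAdjDup sa) with h | h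
      · exact h
      · exact absurd ((hasAdjDup_eq_false_iff sa hpa).mp h) (fun h' => ha (hnda.mp h')))]
    rw [checkCanon, if_neg (fun h => ha h.1)]

-- ===== VERDICT (by name: the statement is the Claim_ definition above) =====
theorem check_spec : Claim_equal_check := by
  intro a b _
  show check a b = check_alt a b
  rw [check_eq_canon, check_alt_eq_canon]
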